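-- pv_equiv track=rewrite | github.com/mikedasquirrel/namesake | analyzers/acoustic_analyzer.py | _name_to_phonemes
-- ===== SOURCE A (Python) =====
-- from typing import Dict, List, Optional, Tuple
--
-- def _name_to_phonemes(name: str) -> List[str]:
--     """Convert name to simplified phoneme representation."""
--     name_lower = name.lower().replace(' ', '')
--     phonemes = []
--     i = 0
--
--     while i < len(name_lower):
--         # Check for digraphs
--         if i < len(name_lower) - 1:
--             digraph = name_lower[i:i+2]
--             if digraph in ['sh', 'ch', 'th', 'ph', 'wh', 'zh']:
--                 phonemes.append(digraph)
--                 i += 2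
--                 continue
--
--         # Single character
--         phonemes.append(name_lower[i])
--         i += 1
--
--     return phonemes
-- ===== SOURCE B (Python) =====
-- def _name_to_phonemes(name):
--     """Convert name to simplified phoneme representation (single pass, no lookahead)."""
--     out = []
--     for c in name.lower():
--         if c == ' ':
--             continue
--         if c == 'h' and out and out[-1] in ('s', 'c', 't', 'p', 'w', 'z'):
--             out[-1] += 'h'
--         else:
--             out.append(c)
--     return out
-- ===== Notes on version B (the rewrite author's own statement) =====
-- stated objective: faster
-- what changed: Replaces the index-advancing while-loop with two-character slice lookahead by a single left-to-right fold that appends each character and retroactively merges a following aitch into a preceding one-letter s/c/t/p/w/z token, avoiding per-step slicing and list construction.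
import Mathlib
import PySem

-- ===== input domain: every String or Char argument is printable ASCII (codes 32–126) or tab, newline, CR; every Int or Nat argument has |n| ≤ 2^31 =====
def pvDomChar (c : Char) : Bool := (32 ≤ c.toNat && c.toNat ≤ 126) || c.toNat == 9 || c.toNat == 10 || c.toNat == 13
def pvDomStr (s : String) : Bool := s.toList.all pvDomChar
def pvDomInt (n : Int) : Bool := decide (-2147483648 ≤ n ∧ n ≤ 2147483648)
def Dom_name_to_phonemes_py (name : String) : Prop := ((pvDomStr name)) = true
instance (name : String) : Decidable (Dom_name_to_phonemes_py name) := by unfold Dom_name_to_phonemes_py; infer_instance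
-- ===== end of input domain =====

-- B replaces A's while-loop with slice lookahead by a one-pass fold that merges an 'h'
-- into a preceding one-letter s/c/t/p/w/z token (objective: alternative decomposition).

-- ===== PORT A =====
-- the while-loop of A: two chars left and the 2-slice is a digraph → consume 2, else consume 1
def aLoop : List Char → List (List Char)
  | [] => []
  | [c] => [[c]]
  | c :: c2 :: rest =>
    if [c, c2] ∈ [['s','h'],['c','h'],['t','h'],['p','h'],['w','h'],['z','h']]
    then [c, c2] :: aLoop rest
    else [c] :: aLoop (c2 :: rest)

def name_to_phonemes_py (name : String) : List String :=
  (aLoop (PySem.Str.replace (PySem.Str.lower name) " " "").toList).map String.ofList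

-- ===== PORT B =====
-- body of B's for-loop: skip spaces; an 'h' after a pending s/c/t/p/w/z token merges into it
def bStep (out : List (List Char)) (c : Char) : List (List Char) :=
  if c = ' ' then out
  else if c = 'h' ∧ out ≠ [] ∧ out.getLast! ∈ [['s'],['c'],['t'],['p'],['w'],['z']] then
    out.dropLast ++ [out.getLast! ++ ['h']]
  else out ++ [[c]]

def name_to_phonemes_py_alt (name : String) : List String :=
  (((PySem.Str.lower name).toList).foldl bStep []).map String.ofList

-- ===== PRECONDITION & SPEC =====
def Spec_name_to_phonemes_py (name : String) (out : List String) : Prop := out = name_to_phonemes_py_alt name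
instance (name : String) (out : List String) : Decidable (Spec_name_to_phonemes_py name out) := by unfold Spec_name_to_phonemes_py; infer_instance

-- ===== CLAIM (what is proved, stated in full; the proofs are below) =====
def Claim_equal_name_to_phonemes_py : Prop := ∀ (name : String), Dom_name_to_phonemes_py name → Spec_name_to_phonemes_py name (name_to_phonemes_py name)

-- ===== LEMMAS AND PROOFS =====

lemma getLast!_concat (acc : List (List Char)) (x : List Char) : (acc ++ [x]).getLast! = x :=
  List.getLast!_of_getLast? List.getLast?_concat

-- replacing the single char ' ' by '' is filtering it out
lemma replace_space_go (fuel : Nat) : ∀ (l : List Char) (acc : List Char), l.length ≤ fuel →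
    PySem.Chars.replace.go [' '] [] fuel l acc = acc.reverse ++ l.filter (· ≠ ' ') := by
  induction fuel with
  | zero =>
    intro l acc hl
    have : l = [] := List.eq_nil_of_length_eq_zero (Nat.le_zero.mp hl)
    subst this
    simp [PySem.Chars.replace.go]
  | succ n ih =>
    intro l acc hl
    cases l with
    | nil => simp [PySem.Chars.replace.go]
    | cons c t =>
      have ht : t.length ≤ n := by simpa using Nat.lt_succ_iff.mp (by simpa using hl)
      by_cases hc : c = ' '
      · subst hc
        have hpre : [' '].isPrefixOf (' ' :: t) = true := by simp [List.isPrefixOf]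
        simp only [PySem.Chars.replace.go, hpre, if_true, List.reverse_nil, List.nil_append,
          List.length_cons, List.length_nil, List.drop_succ_cons, List.drop_zero]
        rw [ih t acc ht]
        simp
      · have hpre : [' '].isPrefixOf (c :: t) = false := by
          simp [List.isPrefixOf, BEq.beq]
          exact fun h => hc h.symm
        simp only [PySem.Chars.replace.go, hpre]
        rw [ih t (c :: acc) ht]
        simp [hc]

lemma replace_space (l : List Char) :
    PySem.Chars.replace l [' '] [] = l.filter (· ≠ ' ') := by
  have h : ([' '] : List Char).isEmpty = false := rfl
  simp only [PySem.Chars.replace, h, Bool.false_eq_true, if_false]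
  exact replace_space_go l.length l [] le_rfl

-- bridging digraph membership (A's test) to single-letter membership (B's test)
lemma digraph_iff (c c2 : Char) :
    [c, c2] ∈ [['s','h'],['c','h'],['t','h'],['p','h'],['w','h'],['z','h']] ↔
      c2 = 'h' ∧ [c] ∈ [['s'],['c'],['t'],['p'],['w'],['z']] := by
  simp only [List.mem_cons, List.cons.injEq, List.not_mem_nil, or_false, and_true]
  tauto

-- the key invariant: on a space-free list, B's fold extends a "settled" accumulator by A's
-- tokenisation (part 1), and with a pending single s/c/t/p/w/z token produces A's tokenisation
-- of that letter prepended (part 2)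
lemma key (n : Nat) : ∀ (l : List Char), l.length ≤ n → (∀ c ∈ l, c ≠ ' ') →
    (∀ acc : List (List Char), ¬(acc ≠ [] ∧ acc.getLast! ∈ [['s'],['c'],['t'],['p'],['w'],['z']]) →
      l.foldl bStep acc = acc ++ aLoop l) ∧
    (∀ (acc : List (List Char)) (c : Char), [c] ∈ [['s'],['c'],['t'],['p'],['w'],['z']] →
      l.foldl bStep (acc ++ [[c]]) = acc ++ aLoop (c :: l)) := by
  induction n with
  | zero =>
    intro l hl _
    have : l = [] := List.eq_nil_of_length_eq_zero (Nat.le_zero.mp hl)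
    subst this
    exact ⟨fun acc _ => by simp [aLoop], fun acc c _ => by simp [aLoop]⟩
  | succ n ih =>
    intro l hl hsp
    constructor
    · intro acc hacc
      cases l with
      | nil => simp [aLoop]
      | cons c1 t =>
        have hc1 : c1 ≠ ' ' := hsp c1 (by simp)
        have hstep : bStep acc c1 = acc ++ [[c1]] := by
          have hcond : ¬(c1 = 'h' ∧ acc ≠ [] ∧
              acc.getLast! ∈ [['s'],['c'],['t'],['p'],['w'],['z']]) :=
            fun ⟨_, h2, h3⟩ => hacc ⟨h2, h3⟩
          unfold bStep
          rw [if_neg hc1, if_neg hcond]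
        have ht : t.length ≤ n := by simpa using Nat.lt_succ_iff.mp (by simpa using hl)
        have htsp : ∀ c ∈ t, c ≠ ' ' := fun c hc => hsp c (by simp [hc])
        by_cases hs : [c1] ∈ [['s'],['c'],['t'],['p'],['w'],['z']]
        · rw [List.foldl_cons, hstep]
          exact (ih t ht htsp).2 acc c1 hs
        · rw [List.foldl_cons, hstep,
            (ih t ht htsp).1 (acc ++ [[c1]])
              (fun ⟨_, h3⟩ => hs (by rwa [getLast!_concat] at h3))]
          cases t with
          | nil => simp [aLoop]
          | cons c2 t' =>
            have hd : ¬ [c1, c2] ∈ [['s','h'],['c','h'],['t','h'],['p','h'],['w','h'],['z','h']] := by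
              rw [digraph_iff]; exact fun ⟨_, h⟩ => hs h
            simp [aLoop, hd]
    · intro acc c hc
      cases l with
      | nil => simp [aLoop]
      | cons c2 t =>
        have hc2 : c2 ≠ ' ' := hsp c2 (by simp)
        have ht : t.length ≤ n := by simpa using Nat.lt_succ_iff.mp (by simpa using hl)
        have htsp : ∀ c ∈ t, c ≠ ' ' := fun c hc => hsp c (by simp [hc])
        by_cases hh : c2 = 'h'
        · subst hh
          have hstep : bStep (acc ++ [[c]]) 'h' = acc ++ [[c, 'h']] := by
            have hcond : ('h' : Char) = 'h' ∧ acc ++ [[c]] ≠ [] ∧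
                (acc ++ [[c]]).getLast! ∈ [['s'],['c'],['t'],['p'],['w'],['z']] :=
              ⟨rfl, by simp, by rwa [getLast!_concat]⟩
            unfold bStep
            rw [if_neg (by decide : ¬('h' : Char) = ' '), if_pos hcond,
              getLast!_concat, List.dropLast_concat]
            simp
          rw [List.foldl_cons, hstep,
            (ih t ht htsp).1 (acc ++ [[c, 'h']])
              (fun ⟨_, h3⟩ => by rw [getLast!_concat] at h3; simp at h3)]
          have hd : [c, 'h'] ∈ [['s','h'],['c','h'],['t','h'],['p','h'],['w','h'],['z','h']] := by
            rw [digraph_iff]; exact ⟨rfl, hc⟩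
          simp [aLoop, hd]
        · have hstep : bStep (acc ++ [[c]]) c2 = (acc ++ [[c]]) ++ [[c2]] := by
            have hcond : ¬(c2 = 'h' ∧ acc ++ [[c]] ≠ [] ∧
                (acc ++ [[c]]).getLast! ∈ [['s'],['c'],['t'],['p'],['w'],['z']]) :=
              fun ⟨h1, _⟩ => hh h1
            unfold bStep
            rw [if_neg hc2, if_neg hcond]
          have hnodg : ¬ [c, c2] ∈ [['s','h'],['c','h'],['t','h'],['p','h'],['w','h'],['z','h']] := by
            rw [digraph_iff]; exact fun ⟨h, _⟩ => hh h
          by_cases hs : [c2] ∈ [['s'],['c'],['t'],['p'],['w'],['z']]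
          · rw [List.foldl_cons, hstep, (ih t ht htsp).2 (acc ++ [[c]]) c2 hs]
            simp [aLoop, hnodg]
          · rw [List.foldl_cons, hstep,
              (ih t ht htsp).1 ((acc ++ [[c]]) ++ [[c2]])
                (fun ⟨_, h3⟩ => hs (by rwa [getLast!_concat] at h3))]
            cases t with
            | nil => simp [aLoop, hnodg]
            | cons c3 t'' =>
              have hd2 : ¬ [c2, c3] ∈ [['s','h'],['c','h'],['t','h'],['p','h'],['w','h'],['z','h']] := by
                rw [digraph_iff]; exact fun ⟨_, h⟩ => hs h
              simp [aLoop, hnodg, hd2]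

-- B's fold ignores spaces, so it folds over the space-filtered list
lemma fold_filter (l : List Char) (acc : List (List Char)) :
    l.foldl bStep acc = (l.filter (· ≠ ' ')).foldl bStep acc := by
  induction l generalizing acc with
  | nil => rfl
  | cons c t ih =>
    by_cases hc : c = ' '
    · subst hc
      simp only [List.foldl_cons, List.filter_cons]
      have h : bStep acc ' ' = acc := by simp [bStep]
      simp [h, ih]
    · simp only [List.foldl_cons, List.filter_cons]
      simp [hc, ih]

lemma main_eq (l : List Char) :
    (l.filter (· ≠ ' ')).foldl bStep [] = aLoop (l.filter (· ≠ ' ')) := by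
  have h := (key (l.filter (· ≠ ' ')).length (l.filter (· ≠ ' ')) le_rfl
    (fun c hc => by simpa using (List.of_mem_filter hc))).1 [] (by simp)
  simpa using h

-- ===== VERDICT (by name: the statement is the Claim_ definition above) =====
theorem name_to_phonemes_py_spec : Claim_equal_name_to_phonemes_py := by
  intro name _
  unfold Spec_name_to_phonemes_py name_to_phonemes_py name_to_phonemes_py_alt
  rw [PySem.Str.toList_replace, PySem.Str.toList_lower]
  have : ("" : String).toList = [] := rfl
  rw [show (" " : String).toList = [' '] from rfl, this,
    replace_space (PySem.Chars.lower name.toList),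
    fold_filter (PySem.Chars.lower name.toList) [], main_eq]
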